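-- pv_equiv track=rewrite | github.com/MrMagicPickle/competitive-programming | leetcode/biweekly-41/q2.py | solve
-- ===== SOURCE A (Python) =====
-- def solve(nums):
--   post = 0
--   for i in range (len(nums)):
--     post += nums[i]
--
--   pre = 0
--   res = []
--   for i in range (len(nums)):
--     n = nums[i]
--     post -= n
--     back = (n * i) - pre
--     front = post - (n * (len(nums) - i - 1))
--     res.append(back+front)
--     pre += n
--
--   return res
-- ===== SOURCE B (Python) =====
-- def solve(nums):
--   res = []
--   for i in range(len(nums)):
--     s = 0
--     for j in range(len(nums)):
--       s += (nums[i] - nums[j]) if j < i else (nums[j] - nums[i]) if j > i else 0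
--     res.append(s)
--   return res
-- ===== Notes on version B (the rewrite author's own statement) =====
-- stated objective: alternative
-- what changed: Replaces A's single linear pass with running prefix/suffix sums by a direct nested scan: for each index i, sum the signed differences (nums[i]-nums[j]) for j<i and (nums[j]-nums[i]) for j>i; no running state is maintained.
import Mathlib
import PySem

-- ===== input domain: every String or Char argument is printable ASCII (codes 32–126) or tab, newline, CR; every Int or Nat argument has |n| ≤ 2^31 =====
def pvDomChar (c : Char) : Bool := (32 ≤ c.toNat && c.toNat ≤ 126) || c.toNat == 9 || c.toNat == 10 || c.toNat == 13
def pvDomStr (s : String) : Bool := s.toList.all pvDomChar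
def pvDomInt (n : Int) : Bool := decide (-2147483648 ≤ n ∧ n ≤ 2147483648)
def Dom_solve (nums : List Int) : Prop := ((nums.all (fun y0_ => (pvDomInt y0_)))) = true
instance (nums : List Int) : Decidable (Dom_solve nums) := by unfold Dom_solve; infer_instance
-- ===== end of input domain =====

-- B replaces A's single pass with running prefix/suffix sums by a direct O(n^2) nested scan
-- of signed differences; same return value, no speed claim (objective: alternative).

-- ===== PORT A =====
-- the body of A's second loop (one step of the fold), as a named helper
def aStep (L : Int) (nums : List Int) (st : Int × Int × List Int) (i : Int) :
    Int × Int × List Int :=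
  let n := PySem.List.pyGetD nums i 0
  let post := st.1 - n
  let back := n * i - st.2.1
  let front := post - n * (L - i - 1)
  (post, st.2.1 + n, st.2.2 ++ [back + front])

def solve (nums : List Int) : List Int :=
  let post : Int := (PySem.List.pyRange 0 (nums.length : Int) 1).foldl
    (fun p i => p + PySem.List.pyGetD nums i 0) 0
  ((PySem.List.pyRange 0 (nums.length : Int) 1).foldl
    (aStep (nums.length : Int) nums) (post, 0, ([] : List Int))).2.2

-- ===== PORT B =====
def solve_alt (nums : List Int) : List Int :=
  (PySem.List.pyRange 0 (nums.length : Int) 1).map (fun i =>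
    (PySem.List.pyRange 0 (nums.length : Int) 1).foldl
      (fun s j =>
        s + (if j < i then PySem.List.pyGetD nums i 0 - PySem.List.pyGetD nums j 0
             else if i < j then PySem.List.pyGetD nums j 0 - PySem.List.pyGetD nums i 0
             else 0)) 0)

-- ===== PRECONDITION & SPEC =====
def Spec_solve (nums : List Int) (out : List Int) : Prop := out = solve_alt nums
instance (nums : List Int) (out : List Int) : Decidable (Spec_solve nums out) := by unfold Spec_solve; infer_instance

-- ===== CLAIM (what is proved, stated in full; the proofs are below) =====
def Claim_equal_solve : Prop := ∀ (nums : List Int), Dom_solve nums → Spec_solve nums (solve nums)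

-- ===== LEMMAS AND PROOFS =====

-- common closed form of the k-th output entry, proved equal to both ports' values
def fSpec (nums : List Int) (k : Nat) : Int :=
  let n := nums.getD k 0
  n * k - (nums.take k).sum + ((nums.drop (k + 1)).sum - n * ((nums.length : Int) - k - 1))

-- aStep with the pair (i, nums[i]) supplied directly (for the enumerate-based invariant)
def pairStep (L : Int) (st : Int × Int × List Int) (p : Int × Int) : Int × Int × List Int :=
  (st.1 - p.2, st.2.1 + p.2,
   st.2.2 ++ [p.2 * p.1 - st.2.1 + (st.1 - p.2 - p.2 * (L - p.1 - 1))])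

theorem aStep_eq_pairStep (L : Int) (nums : List Int) (st : Int × Int × List Int) (i : Int) :
    aStep L nums st i = pairStep L st (i, PySem.List.pyGetD nums i 0) := rfl

theorem sum_map_sub_left (l : List Int) (n : Int) :
    (l.map (fun x => n - x)).sum = l.length * n - l.sum := by
  induction l with
  | nil => simp
  | cons a t ih => simp [ih]; ring

theorem sum_map_sub_right (l : List Int) (n : Int) :
    (l.map (fun x => x - n)).sum = l.sum - l.length * n := by
  induction l with
  | nil => simp
  | cons a t ih => simp [ih]; ring

-- the invariant of A's main fold: processing the suffix l after prefix pfx appends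
-- exactly the closed-form entries for indices pfx.length, …, pfx.length + l.length - 1
theorem foldA_inv (nums : List Int) :
    ∀ (l pfx acc : List Int), nums = pfx ++ l →
    ((PySem.List.enumerate l (pfx.length : Int)).foldl
        (pairStep (nums.length : Int)) (l.sum, pfx.sum, acc)).2.2
      = acc ++ (List.range' pfx.length l.length).map (fSpec nums) := by
  intro l
  induction l with
  | nil => intro pfx acc _; simp [PySem.List.enumerate_nil]
  | cons n t ih =>
    intro pfx acc h
    rw [PySem.List.enumerate_cons, List.foldl_cons]
    have hstep : pairStep (nums.length : Int) ((n :: t).sum, pfx.sum, acc) ((pfx.length : Int), n)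
        = (t.sum, (pfx ++ [n]).sum,
           acc ++ [n * (pfx.length : Int) - pfx.sum +
             ((n :: t).sum - n - n * ((nums.length : Int) - (pfx.length : Int) - 1))]) := by
      simp only [pairStep, Prod.mk.injEq]
      refine ⟨by simp, by simp, by simp⟩
    rw [hstep]
    have hlen : ((pfx ++ [n]).length : Int) = (pfx.length : Int) + 1 := by simp
    have h2 : nums = (pfx ++ [n]) ++ t := by simp [h]
    have := ih (pfx ++ [n])
      (acc ++ [n * (pfx.length : Int) - pfx.sum +
        ((n :: t).sum - n - n * ((nums.length : Int) - (pfx.length : Int) - 1))]) h2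
    rw [hlen] at this
    have hentry : n * (pfx.length : Int) - pfx.sum +
        ((n :: t).sum - n - n * ((nums.length : Int) - (pfx.length : Int) - 1))
        = fSpec nums pfx.length := by
      subst h
      have hd : (pfx ++ n :: t).drop (pfx.length + 1) = t := by
        simp [List.drop_append]
      have hg : (pfx ++ n :: t).getD pfx.length 0 = n := by simp
      have htk : (pfx ++ n :: t).take pfx.length = pfx := by
        simp
      simp only [fSpec, hd, hg, htk, List.sum_cons, List.length_append, List.length_cons]
      push_cast
      ring
    rw [this, hentry]
    simp [List.range'_succ, List.append_assoc]

theorem solve_eq_spec (nums : List Int) :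
    solve nums = (List.range nums.length).map (fSpec nums) := by
  unfold solve
  have h1 : (PySem.List.pyRange 0 (nums.length : Int) 1).foldl
      (fun p i => p + PySem.List.pyGetD nums i 0) 0 = nums.sum := by
    rw [PySem.List.foldl_pyRange_zero_pyGetD' nums 0 (fun p x => p + x) 0]
    simp [List.sum_eq_foldl]
  have h2 : (PySem.List.pyRange 0 (nums.length : Int) 1).foldl
        (aStep (nums.length : Int) nums) (nums.sum, 0, ([] : List Int))
      = (PySem.List.enumerate nums 0).foldl
        (pairStep (nums.length : Int)) (nums.sum, 0, ([] : List Int)) := by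
    rw [PySem.List.enumerate_eq_map_pyRange nums 0, List.foldl_map]
    have hfn : aStep (nums.length : Int) nums
        = fun st i => pairStep (nums.length : Int) st (i, PySem.List.pyGetD nums i 0) := by
      funext st i
      exact aStep_eq_pairStep (nums.length : Int) nums st i
    rw [hfn]
    simp [PySem.List.len_eq]
  simp only [h1, h2]
  have := foldA_inv nums nums [] [] rfl
  simp only [List.length_nil, Nat.cast_zero, List.sum_nil, List.nil_append] at this
  rw [this, List.range_eq_range']

theorem solve_alt_eq_spec (nums : List Int) :
    solve_alt nums = (List.range nums.length).map (fSpec nums) := by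
  unfold solve_alt
  rw [PySem.List.pyRange_zero_nat nums.length, List.map_map]
  apply List.map_congr_left
  intro k hk
  rw [List.mem_range] at hk
  simp only [Function.comp]
  rw [PySem.List.foldl_add]
  rw [← PySem.List.pyRange_zero_nat nums.length]
  rw [PySem.List.pyRange_one_append 0 (k : Int) (nums.length : Int) (by positivity)
    (by exact_mod_cast hk.le)]
  rw [PySem.List.pyRange_one_cons (show (k : Int) < (nums.length : Int) by exact_mod_cast hk)]
  rw [List.map_append, List.sum_append, List.map_cons, List.sum_cons]
  have hk' : (k : Int) < (nums.length : Int) := by exact_mod_cast hk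
  have htl : (nums.take k).length = k := by simp [hk.le]
  have hS1 : ((PySem.List.pyRange 0 (k : Int) 1).map
      (fun j => if j < (k : Int) then PySem.List.pyGetD nums (k : Int) 0 - PySem.List.pyGetD nums j 0
        else if (k : Int) < j then PySem.List.pyGetD nums j 0 - PySem.List.pyGetD nums (k : Int) 0
        else 0)).sum
      = (k : Int) * PySem.List.pyGetD nums (k : Int) 0 - (nums.take k).sum := by
    have hcg : ((PySem.List.pyRange 0 (k : Int) 1).map
        (fun j => if j < (k : Int) then PySem.List.pyGetD nums (k : Int) 0 - PySem.List.pyGetD nums j 0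
          else if (k : Int) < j then PySem.List.pyGetD nums j 0 - PySem.List.pyGetD nums (k : Int) 0
          else 0))
        = (PySem.List.pyRange 0 (k : Int) 1).map
          (fun j => PySem.List.pyGetD nums (k : Int) 0 - PySem.List.pyGetD (nums.take k) j 0) := by
      apply List.map_congr_left
      intro j hj
      rw [PySem.List.mem_pyRange_one] at hj
      rw [if_pos hj.2]
      congr 1
      rw [PySem.List.pyGetD_eq_getElem nums 0 hj.1 (lt_trans hj.2 hk'),
        PySem.List.pyGetD_eq_getElem (nums.take k) 0 hj.1
          (by rw [htl]; exact_mod_cast hj.2)]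
      exact (List.getElem_take).symm
    rw [hcg]
    have hmm : (fun j => PySem.List.pyGetD nums (k : Int) 0 - PySem.List.pyGetD (nums.take k) j 0)
        = (fun x => PySem.List.pyGetD nums (k : Int) 0 - x) ∘
          (fun j => PySem.List.pyGetD (nums.take k) j 0) := rfl
    rw [hmm, ← List.map_map]
    rw [show ((k : Nat) : Int) = ((nums.take k).length : Int) by rw [htl]]
    rw [PySem.List.map_pyGetD_pyRange_zero' (nums.take k) 0]
    rw [sum_map_sub_left]
  have hS3 : ((PySem.List.pyRange ((k : Int) + 1) (nums.length : Int) 1).map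
      (fun j => if j < (k : Int) then PySem.List.pyGetD nums (k : Int) 0 - PySem.List.pyGetD nums j 0
        else if (k : Int) < j then PySem.List.pyGetD nums j 0 - PySem.List.pyGetD nums (k : Int) 0
        else 0)).sum
      = (nums.drop (k + 1)).sum - ((nums.drop (k + 1)).length : Int) * PySem.List.pyGetD nums (k : Int) 0 := by
    have hcg : ((PySem.List.pyRange ((k : Int) + 1) (nums.length : Int) 1).map
        (fun j => if j < (k : Int) then PySem.List.pyGetD nums (k : Int) 0 - PySem.List.pyGetD nums j 0
          else if (k : Int) < j then PySem.List.pyGetD nums j 0 - PySem.List.pyGetD nums (k : Int) 0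
          else 0))
        = (PySem.List.pyRange ((k : Int) + 1) (nums.length : Int) 1).map
          (fun j => PySem.List.pyGetD nums j 0 - PySem.List.pyGetD nums (k : Int) 0) := by
      apply List.map_congr_left
      intro j hj
      rw [PySem.List.mem_pyRange_one] at hj
      rw [if_neg (by omega), if_pos (by omega)]
    rw [hcg]
    have hmm : (fun j => PySem.List.pyGetD nums j 0 - PySem.List.pyGetD nums (k : Int) 0)
        = (fun x => x - PySem.List.pyGetD nums (k : Int) 0) ∘
          (fun j => PySem.List.pyGetD nums j 0) := rfl
    rw [hmm, ← List.map_map]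
    rw [PySem.List.map_pyGetD_pyRange' nums 0 (show (0 : Int) ≤ (k : Int) + 1 by positivity)]
    rw [show ((k : Int) + 1).toNat = k + 1 by omega]
    rw [sum_map_sub_right]
  rw [hS1, hS3]
  have hmid : (if (k : Int) < (k : Int) then PySem.List.pyGetD nums (k : Int) 0 - PySem.List.pyGetD nums (k : Int) 0
      else if (k : Int) < (k : Int) then PySem.List.pyGetD nums (k : Int) 0 - PySem.List.pyGetD nums (k : Int) 0
      else 0) = 0 := by simp
  rw [hmid]
  have hget : PySem.List.pyGetD nums (k : Int) 0 = nums.getD k 0 := by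
    simp [PySem.List.pyGetD_natCast]
  have hdl : ((nums.drop (k + 1)).length : Int) = (nums.length : Int) - (k : Int) - 1 := by
    rw [List.length_drop]; omega
  rw [hget, hdl]
  simp only [fSpec]
  ring

-- ===== VERDICT (by name: the statement is the Claim_ definition above) =====
theorem solve_spec : Claim_equal_solve := by
  intro nums _
  unfold Spec_solve
  rw [solve_eq_spec, solve_alt_eq_spec]
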